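-- pv_equiv track=rewrite | github.com/jeebzi/pnms | gen_pnms.py | make_matrice_gamma
-- ===== SOURCE A (Python) =====
-- def make_matrice_gamma(gamma, n, p):
--     """
--     fait la lsite des polynomes que s'annule en gamma
--     """
--     matrice = []
--     i = 0
--     while i < n:
--         j = 0
--         tab = []
--         while j < n:
--             if i == 0 and j == 0:
--                 tab += [p]
--             elif i != 0 and j == 0:
--                 tab += [-gamma**i]
--             elif i == j:
--                 tab += [1]
--             else:
--                 tab += [0]
--             j += 1
--         matrice += [tab]
--         i += 1
--     return matrice
-- ===== SOURCE B (Python) =====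
-- def make_matrice_gamma(gamma, n, p):
--     # Single pass over rows: each row is assembled from whole zero-blocks by
--     # arithmetic placement ([head] + zeros + [1] + zeros), and the power
--     # -gamma**i is maintained incrementally (pw *= gamma) instead of being
--     # recomputed per row; no inner per-cell loop or branch at all.
--     if n <= 0:
--         return []
--     rows = [[p] + [0] * (n - 1)]
--     pw = 1
--     for i in range(1, n):
--         pw *= gamma
--         rows.append([-pw] + [0] * (i - 1) + [1] + [0] * (n - 1 - i))
--     return rows
-- ===== Notes on version B (the rewrite author's own statement) =====
-- stated objective: faster
-- what changed: Replaces the nested per-cell four-way branch by a single pass over rows that assembles each row from whole zero-blocks ([head]+[0]*(i-1)+[1]+[0]*(n-1-i)) and maintains the power -gamma**i incrementally with a running accumulator instead of recomputing gamma**i per row.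
import Mathlib
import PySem

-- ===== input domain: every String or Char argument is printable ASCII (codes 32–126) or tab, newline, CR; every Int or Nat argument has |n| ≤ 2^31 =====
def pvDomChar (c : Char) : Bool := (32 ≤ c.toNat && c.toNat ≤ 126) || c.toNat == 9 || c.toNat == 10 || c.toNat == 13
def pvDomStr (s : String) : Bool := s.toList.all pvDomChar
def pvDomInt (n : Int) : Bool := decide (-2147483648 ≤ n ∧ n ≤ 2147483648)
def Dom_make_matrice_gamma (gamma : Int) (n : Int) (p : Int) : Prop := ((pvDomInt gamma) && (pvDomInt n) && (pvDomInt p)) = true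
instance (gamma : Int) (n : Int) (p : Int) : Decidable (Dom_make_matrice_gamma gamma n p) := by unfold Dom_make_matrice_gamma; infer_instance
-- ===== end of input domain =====

-- B assembles each row from whole zero-blocks in one pass over rows, with the power -gamma**i
-- maintained incrementally, instead of A's nested per-cell four-way branch.


-- ===== PORT A =====
def make_matrice_gamma (gamma : Int) (n : Int) (p : Int) : List (List Int) :=
  -- while i < n / while j < n with list-append accumulation, transcribed as folds over range
  let m := n.toNat
  List.foldl (fun matrice i =>
    matrice ++ [List.foldl (fun tab j =>
      tab ++ [if i = 0 ∧ j = 0 then p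
              else if i ≠ 0 ∧ j = 0 then -(gamma ^ i)
              else if i = j then (1 : Int) else 0]) [] (List.range m)]) [] (List.range m)

-- ===== PORT B =====
def make_matrice_gamma_alt (gamma : Int) (n : Int) (p : Int) : List (List Int) :=
  -- single pass over rows: zero-block assembly, running power pw
  if n ≤ 0 then []
  else
    let m := n.toNat
    (List.foldl (fun (st : Int × List (List Int)) i =>
        let pw := st.1 * gamma
        (pw, st.2 ++ [[-pw] ++ List.replicate (i - 1) 0 ++ [(1 : Int)] ++ List.replicate (m - 1 - i) 0]))
      ((1 : Int), [[p] ++ List.replicate (m - 1) (0 : Int)]) (List.range' 1 (m - 1))).2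

-- ===== PRECONDITION & SPEC =====
def Spec_make_matrice_gamma (gamma : Int) (n : Int) (p : Int) (out : List (List Int)) : Prop := out = make_matrice_gamma_alt gamma n p
instance (gamma : Int) (n : Int) (p : Int) (out : List (List Int)) : Decidable (Spec_make_matrice_gamma gamma n p out) := by unfold Spec_make_matrice_gamma; infer_instance

-- ===== CLAIM (what is proved, stated in full; the proofs are below) =====
def Claim_equal_make_matrice_gamma : Prop := ∀ (gamma : Int) (n : Int) (p : Int), Dom_make_matrice_gamma gamma n p → Spec_make_matrice_gamma gamma n p (make_matrice_gamma gamma n p)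

-- ===== LEMMAS AND PROOFS =====

-- the common row function both programs produce
def pvRow (gamma p : Int) (m i : Nat) : List Int :=
  if i = 0 then [p] ++ List.replicate (m - 1) 0
  else [-(gamma ^ i)] ++ List.replicate (i - 1) 0 ++ [(1 : Int)] ++ List.replicate (m - 1 - i) 0

lemma foldl_app {α β : Type} (f : α → β) :
    ∀ (l : List α) (acc : List β),
      List.foldl (fun acc x => acc ++ [f x]) acc l = acc ++ l.map f := by
  intro l
  induction l with
  | nil => simp
  | cons a t ih => intro acc; simp [List.foldl, ih]

-- B's fold invariant: the running power is gamma^a and rows accumulate pvRow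
lemma alt_fold_inv (gamma p : Int) (m : Nat) :
    ∀ (k a : Nat) (rows : List (List Int)),
      List.foldl (fun (st : Int × List (List Int)) i =>
          (st.1 * gamma, st.2 ++ [[-(st.1 * gamma)] ++ List.replicate (i - 1) 0 ++ [(1 : Int)] ++ List.replicate (m - 1 - i) 0]))
        (gamma ^ a, rows) (List.range' (a + 1) k)
      = (gamma ^ (a + k), rows ++ (List.range' (a + 1) k).map (pvRow gamma p m)) := by
  intro k
  induction k with
  | zero => intro a rows; simp
  | succ k ih =>
    intro a rows
    rw [List.range'_succ, List.foldl_cons]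
    have hpow : gamma ^ a * gamma = gamma ^ (a + 1) := (pow_succ gamma a).symm
    rw [hpow]
    have := ih (a + 1) (rows ++ [[-(gamma ^ (a + 1))] ++ List.replicate (a + 1 - 1) 0 ++ [(1 : Int)] ++ List.replicate (m - 1 - (a + 1)) 0])
    rw [this]
    simp only [Prod.mk.injEq]
    refine ⟨by rw [show a + 1 + k = a + (k + 1) from by omega], ?_⟩
    simp [pvRow, List.append_assoc]

-- A's inner loop produces exactly pvRow, for i < m
lemma row_eq (gamma p : Int) (m i : Nat) (him : i < m) :
    (List.range m).map (fun j => if i = 0 ∧ j = 0 then p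
              else if i ≠ 0 ∧ j = 0 then -(gamma ^ i)
              else if i = j then (1 : Int) else 0) = pvRow gamma p m i := by
  apply List.ext_getElem
  · by_cases hi : i = 0 <;> simp [pvRow, hi] <;> omega
  · intro j h1 h2
    simp only [List.getElem_map, List.getElem_range]
    by_cases hi : i = 0
    · subst hi
      cases j with
      | zero => simp [pvRow]
      | succ k =>
        simp [pvRow]
    · simp only [pvRow, if_neg hi]
      cases j with
      | zero => simp [hi]
      | succ k =>
        have hk : k + 1 < m := by simpa using h1
        have hklt : k < (i - 1) + 1 + (m - 1 - i) := by
          simp only [pvRow, if_neg hi, List.length_append, List.length_replicate,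
            List.length_cons, List.length_nil] at h2
          omega
        simp only [if_neg (show ¬(i = 0 ∧ k + 1 = 0) by simp [hi]),
          if_neg (show ¬(i ≠ 0 ∧ k + 1 = 0) by simp),
          List.cons_append, List.getElem_cons_succ]
        by_cases hik : i = k + 1
        · rw [List.getElem_append_left (by simp; omega), List.getElem_append_right (by simp; omega)]
          simp [hik]
        · rw [if_neg hik]
          by_cases hlt : k < i - 1
          · rw [List.getElem_append_left (by simp; omega), List.getElem_append_left (by simpa)]
            simp
          · rw [List.getElem_append_right (by simp; omega), List.getElem_replicate]

-- ===== VERDICT (by name: the statement is the Claim_ definition above) =====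
theorem make_matrice_gamma_spec : Claim_equal_make_matrice_gamma := by
  intro gamma n p _
  unfold Spec_make_matrice_gamma make_matrice_gamma make_matrice_gamma_alt
  by_cases hn : n ≤ 0
  · have : n.toNat = 0 := by omega
    simp [hn, this]
  · have hm : 0 < n.toNat := by omega
    simp only [if_neg hn]
    simp only [foldl_app, List.nil_append]
    have hfold := alt_fold_inv gamma p n.toNat (n.toNat - 1) 0
      [[p] ++ List.replicate (n.toNat - 1) (0 : Int)]
    simp only [pow_zero, Nat.zero_add] at hfold
    rw [hfold]
    have hrange : List.range n.toNat = 0 :: List.range' 1 (n.toNat - 1) := by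
      rw [List.range_eq_range']
      cases h : n.toNat with
      | zero => omega
      | succ k => simp [List.range'_succ]
    rw [List.map_congr_left (fun i hi => row_eq gamma p n.toNat i (List.mem_range.mp hi))]
    rw [hrange, List.map_cons]
    simp [pvRow]
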